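-- pv_equiv track=rewrite | github.com/Raheelghafoor/PythonFourWeekInternship | day11.py | filter_sequence_d11q2
-- ===== SOURCE A (Python) =====
-- def filter_sequence_d11q2(data_d11q2):
--     seen_d11q2 = set()
--     result_d11q2 = []
--     for item_d11q2 in data_d11q2:
--         if item_d11q2 is None:
--             continue
--         if item_d11q2 < 0:
--             continue
--         if item_d11q2 in seen_d11q2:
--             continue
--         seen_d11q2.add(item_d11q2)
--         result_d11q2.append(item_d11q2)
--     return result_d11q2
-- ===== SOURCE B (Python) =====
-- def filter_sequence_d11q2(data_d11q2):
--     result_d11q2 = []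
--     pending_d11q2 = list(data_d11q2)
--     while pending_d11q2:
--         x = pending_d11q2.pop(0)
--         if x is None or x < 0:
--             continue
--         result_d11q2.append(x)
--         pending_d11q2 = [y for y in pending_d11q2 if y != x]
--     return result_d11q2
-- ===== Notes on version B (the rewrite author's own statement) =====
-- stated objective: alternative
-- what changed: Instead of A's single pass with a seen-set, B keeps no auxiliary membership structure at all: it works through a shrinking worklist, and each time a value is emitted it eagerly deletes all remaining equal occurrences from the worklist, so duplicates never reach the emit test.
import Mathlib
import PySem

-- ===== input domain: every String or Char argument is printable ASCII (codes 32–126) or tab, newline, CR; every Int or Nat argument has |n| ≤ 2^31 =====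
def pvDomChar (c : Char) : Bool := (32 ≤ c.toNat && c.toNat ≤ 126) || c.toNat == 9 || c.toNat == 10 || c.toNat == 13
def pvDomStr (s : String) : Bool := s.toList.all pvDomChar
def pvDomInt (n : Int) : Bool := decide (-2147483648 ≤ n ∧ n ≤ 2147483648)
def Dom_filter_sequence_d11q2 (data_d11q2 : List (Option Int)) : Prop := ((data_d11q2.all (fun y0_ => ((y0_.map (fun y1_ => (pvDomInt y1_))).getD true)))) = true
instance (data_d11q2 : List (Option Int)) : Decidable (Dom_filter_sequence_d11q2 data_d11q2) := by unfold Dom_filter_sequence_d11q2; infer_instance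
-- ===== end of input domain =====

-- B keeps no seen-set: it works through a shrinking worklist and, each time a value is emitted,
-- eagerly deletes all remaining equal occurrences from the worklist (alternative decomposition).

-- ===== PORT A =====
-- one loop over the input: skip None, skip negatives, skip already-seen, else record in the seen set and append
def filter_sequence_d11q2 (data_d11q2 : List (Option Int)) : List Int :=
  (data_d11q2.foldl
    (fun (st : PySem.Set Int × List Int) item_d11q2 =>
      match item_d11q2 with
      | none => st
      | some x =>
        if x < 0 then st
        else if PySem.Set.contains st.1 x then st
        else (PySem.Set.add st.1 x, st.2 ++ [x]))
    (PySem.Set.empty, [])).2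

-- ===== PORT B =====
-- 'while pending: x = pending.pop(0); …; pending = [y for y in pending if y != x]'
def filter_sequence_d11q2_altGo (result : List Int) (pending : List (Option Int)) : List Int :=
  match pending with
  | [] => result
  | x :: rest =>
    match x with
    | none => filter_sequence_d11q2_altGo result rest
    | some v =>
      if v < 0 then filter_sequence_d11q2_altGo result rest
      else filter_sequence_d11q2_altGo (result ++ [v]) (rest.filter (fun y => y != some v))
  termination_by pending.length
  decreasing_by
    all_goals simp [Nat.lt_succ_iff]
    all_goals exact List.length_filter_le _ _

def filter_sequence_d11q2_alt (data_d11q2 : List (Option Int)) : List Int :=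
  filter_sequence_d11q2_altGo [] data_d11q2

-- ===== PRECONDITION & SPEC =====
def Spec_filter_sequence_d11q2 (data_d11q2 : List (Option Int)) (out : List Int) : Prop := out = filter_sequence_d11q2_alt data_d11q2
instance (data_d11q2 : List (Option Int)) (out : List Int) : Decidable (Spec_filter_sequence_d11q2 data_d11q2 out) := by unfold Spec_filter_sequence_d11q2; infer_instance

-- ===== CLAIM (what is proved, stated in full; the proofs are below) =====
def Claim_equal_filter_sequence_d11q2 : Prop := ∀ (data_d11q2 : List (Option Int)), Dom_filter_sequence_d11q2 data_d11q2 → Spec_filter_sequence_d11q2 data_d11q2 (filter_sequence_d11q2 data_d11q2)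

-- ===== LEMMAS AND PROOFS =====

-- the kept values: drop None and negatives
def pvKeep (l : List (Option Int)) : List Int :=
  l.filterMap (fun x => match x with
    | none => none
    | some v => if v < 0 then none else some v)

-- reference first-occurrence dedup by removing equals from the remainder
def pvNub : List Int → List Int
  | [] => []
  | x :: l => x :: pvNub (l.filter (fun y => y != x))
  termination_by l => l.length
  decreasing_by simpa using Nat.lt_succ_of_le (List.length_filter_le _ _)

-- filtering the worklist commutes with pvKeep
theorem pvKeep_filter (l : List (Option Int)) (v : Int) :
    pvKeep (l.filter (fun y => y != some v)) = (pvKeep l).filter (fun y => y != v) := by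
  induction l with
  | nil => rfl
  | cons hd tl ih =>
    cases hd with
    | none => simpa [pvKeep] using ih
    | some w =>
      by_cases hw : w < 0 <;> by_cases hv : w = v <;>
        simp_all [pvKeep, List.filter_cons, List.filterMap_cons]

-- B's loop computes result ++ pvNub (pvKeep pending)
theorem pv_altGo_eq (pending : List (Option Int)) (result : List Int) :
    filter_sequence_d11q2_altGo result pending = result ++ pvNub (pvKeep pending) := by
  fun_induction filter_sequence_d11q2_altGo result pending with
  | case1 res => simp [pvKeep, pvNub]
  | case2 res rest ih =>
    rw [ih]; simp [pvKeep]
  | case3 res rest v hneg ih =>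
    rw [ih]; simp [pvKeep, List.filterMap_cons, hneg]
  | case4 res rest v hneg ih =>
    simp only [List.unattach_filter, List.unattach_attach] at ih
    rw [ih, pvKeep_filter]
    simp [pvKeep, List.filterMap_cons, hneg, pvNub]

-- folding Set.add over l starting from acc appends pvNub of the fresh elements
theorem pv_foldl_add_eq (l : List Int) (acc : List Int) :
    List.foldl PySem.Set.add acc l = acc ++ pvNub (l.filter (fun x => !(acc.contains x))) := by
  induction l generalizing acc with
  | nil => simp [pvNub]
  | cons x tl ih =>
    by_cases hmem : x ∈ acc
    · have : PySem.Set.add acc x = acc := by simp [PySem.Set.add, hmem]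
      simp [List.foldl_cons, ih, hmem]
    · have hadd : PySem.Set.add acc x = acc ++ [x] := by simp [PySem.Set.add, hmem]
      have hfil : (tl.filter (fun y => !( (acc ++ [x]).contains y)))
          = (tl.filter (fun y => !(acc.contains y))).filter (fun y => y != x) := by
        rw [List.filter_filter]
        apply List.filter_congr
        intro y _
        by_cases hy : y ∈ acc <;> by_cases hyx : y = x <;> simp_all
      rw [List.foldl_cons, hadd, ih, hfil]
      simp [hmem, pvNub]

-- A's loop invariant: when the seen set equals the result list, the loop result is
-- the Set.add fold over the kept elements.
theorem pv_loop_eq (data_d11q2 : List (Option Int)) (acc : List Int) :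
    (data_d11q2.foldl
      (fun (st : PySem.Set Int × List Int) item_d11q2 =>
        match item_d11q2 with
        | none => st
        | some x =>
          if x < 0 then st
          else if PySem.Set.contains st.1 x then st
          else (PySem.Set.add st.1 x, st.2 ++ [x]))
      (acc, acc)).2
    = (pvKeep data_d11q2).foldl PySem.Set.add acc := by
  induction data_d11q2 generalizing acc with
  | nil => rfl
  | cons hd tl ih =>
    cases hd with
    | none => simpa [pvKeep, List.filterMap_cons] using ih acc
    | some x =>
      by_cases hneg : x < 0
      · simpa [pvKeep, List.filterMap_cons, hneg] using ih acc
      · by_cases hmem : x ∈ acc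
        · have hadd : PySem.Set.add acc x = acc := by simp [PySem.Set.add, hmem]
          simpa [pvKeep, List.filterMap_cons, hneg, hmem, hadd, PySem.Set.contains] using ih acc
        · have hadd : PySem.Set.add acc x = acc ++ [x] := by simp [PySem.Set.add, hmem]
          simpa [pvKeep, List.filterMap_cons, hneg, hmem, hadd, PySem.Set.contains] using ih (acc ++ [x])

-- ===== VERDICT (by name: the statement is the Claim_ definition above) =====
theorem filter_sequence_d11q2_spec : Claim_equal_filter_sequence_d11q2 := by
  intro d _
  show _ = _
  rw [filter_sequence_d11q2_alt, pv_altGo_eq, filter_sequence_d11q2,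
    show (PySem.Set.empty : PySem.Set Int) = ([] : List Int) from rfl,
    pv_loop_eq, pv_foldl_add_eq]
  simp
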